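-- pv_equiv track=rewrite | github.com/svgbogdnn/algorithms-data-structures-IDAS_course- | [CONTEST] 6 , 7 'ИСАД АиСД-1 2526. ДЗ 6-7. Динамическое программирование. Рюкзак'/2.py | ChampagnePapi21
-- ===== SOURCE A (Python) =====
-- def ChampagnePapi21(n):
--     if n == 0:
--         return 1
--     if n == 1:
--         return 1
--
--     a = [0] * (n + 1)
--     a[0] = 1
--     a[1] = 1
--
--     i = 2
--     while i <= n:
--         if i % 2 == 0:
--             k = i // 2
--             a[i] = a[k] + a[k - 1]
--         else:
--             k = i // 2
--             a[i] = a[k] - a[k - 1]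
--         i = i + 1
--
--     ret = a[n]
--     return ret
-- ===== SOURCE B (Python) =====
-- def ChampagnePapi21(n):
--     memo = {0: 1, 1: 1}
--
--     def f(m):
--         if m in memo:
--             return memo[m]
--         k = m // 2
--         if m % 2 == 0:
--             v = f(k) + f(k - 1)
--         else:
--             v = f(k) - f(k - 1)
--         memo[m] = v
--         return v
--
--     return f(n)
-- ===== Notes on version B (the rewrite author's own statement) =====
-- stated objective: faster
-- what changed: Replaced the O(n) bottom-up array of all values a[0..n] with a memoized top-down recursion that only evaluates the O(log n) indices actually reachable from n via k = m//2 and k-1.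
-- outside the precondition, e.g. on ChampagnePapi21(-1): A raises IndexError, B raises RecursionError
import Mathlib
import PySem

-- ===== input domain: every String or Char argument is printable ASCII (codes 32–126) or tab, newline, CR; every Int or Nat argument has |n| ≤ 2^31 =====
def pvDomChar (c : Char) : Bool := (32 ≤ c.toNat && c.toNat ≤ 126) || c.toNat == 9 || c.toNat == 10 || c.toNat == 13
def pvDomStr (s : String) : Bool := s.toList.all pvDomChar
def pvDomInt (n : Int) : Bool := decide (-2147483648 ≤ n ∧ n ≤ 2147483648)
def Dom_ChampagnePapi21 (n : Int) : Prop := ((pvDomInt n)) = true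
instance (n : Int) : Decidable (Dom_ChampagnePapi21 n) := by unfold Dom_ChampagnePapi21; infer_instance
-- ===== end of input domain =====

-- B replaces A's O(n) bottom-up array with a memoized top-down recursion over the
-- O(log n) indices reachable from n; equivalence of RETURN values is proved for n ≥ 0.

-- ===== PORT A =====
-- one iteration of A's while-loop body (state: the list a, loop index i)
def pvStepA (a : Array Int) (i : Nat) : Array Int :=
  if i % 2 = 0 then a.set! i (a.getD (i / 2) 0 + a.getD (i / 2 - 1) 0)
  else a.set! i (a.getD (i / 2) 0 - a.getD (i / 2 - 1) 0)

def ChampagnePapi21 (n : Int) : Int :=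
  if n = 0 then 1
  else if n = 1 then 1
  else
    let N := n.toNat
    let a0 := ((Array.replicate (N + 1) (0 : Int)).set! 0 1).set! 1 1
    let a := (List.range' 2 (N - 1)).foldl pvStepA a0
    a.getD N 0

-- ===== PORT B =====
-- B's recursion f(m) = f(m//2) ± f(m//2 - 1); the Python memo only speeds this up.
def pvAltRec : Nat → Int
  | 0 => 1
  | 1 => 1
  | (m + 2) =>
    let k := (m + 2) / 2
    if (m + 2) % 2 = 0 then pvAltRec k + pvAltRec (k - 1)
    else pvAltRec k - pvAltRec (k - 1)
decreasing_by all_goals omega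

def ChampagnePapi21_alt (n : Int) : Int := pvAltRec n.toNat

-- ===== PRECONDITION & SPEC =====
-- Pre_ excludes n < 0, on which A raises IndexError (a[0] = 1 on an empty list).
def Pre_ChampagnePapi21 (n : Int) : Prop := 0 ≤ n
instance (n : Int) : Decidable (Pre_ChampagnePapi21 n) := by unfold Pre_ChampagnePapi21; infer_instance
def pvWitness_ChampagnePapi21 : Int := (5)

def Spec_ChampagnePapi21 (n : Int) (out : Int) : Prop := out = ChampagnePapi21_alt n
instance (n : Int) (out : Int) : Decidable (Spec_ChampagnePapi21 n out) := by unfold Spec_ChampagnePapi21; infer_instance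

-- ===== CLAIM (what is proved, stated in full; the proofs are below) =====
def Claim_equal_ChampagnePapi21 : Prop := ∀ (n : Int), Dom_ChampagnePapi21 n → Pre_ChampagnePapi21 n → Spec_ChampagnePapi21 n (ChampagnePapi21 n)

-- ===== LEMMAS AND PROOFS =====

lemma pvAltRec_zero : pvAltRec 0 = 1 := by simp [pvAltRec]
lemma pvAltRec_one : pvAltRec 1 = 1 := by simp [pvAltRec]

lemma pvAltRec_step (m : Nat) :
    pvAltRec (m + 2) =
      if (m + 2) % 2 = 0 then pvAltRec ((m + 2) / 2) + pvAltRec ((m + 2) / 2 - 1)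
      else pvAltRec ((m + 2) / 2) - pvAltRec ((m + 2) / 2 - 1) := by
  rw [pvAltRec]

lemma pvGetD_set_self (a : Array Int) (i : Nat) (v : Int) (h : i < a.size) :
    (a.set! i v).getD i 0 = v := by
  simp [Array.set!, Array.getD, h, Array.getElem_setIfInBounds_self]

lemma pvGetD_set_ne (a : Array Int) (i j : Nat) (v : Int) (h : i ≠ j) :
    (a.set! i v).getD j 0 = a.getD j 0 := by
  simp only [Array.set!, Array.getD, Array.size_setIfInBounds]
  split
  · exact Array.getElem_setIfInBounds_ne (h := h) (hj := by assumption)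
  · rfl

-- A's loop invariant: after processing indices 2 .. c+1, the list has length N+1
-- and agrees with B's recursion on every index below c+2.
lemma pvInv (N : Nat) (hN : 2 ≤ N) (c : Nat) (hc : c ≤ N - 1) :
    ((List.range' 2 c).foldl pvStepA (((Array.replicate (N + 1) (0 : Int)).set! 0 1).set! 1 1)).size = N + 1 ∧
    ∀ j, j < c + 2 →
      ((List.range' 2 c).foldl pvStepA (((Array.replicate (N + 1) (0 : Int)).set! 0 1).set! 1 1)).getD j 0 = pvAltRec j := by
  induction c with
  | zero =>
    refine ⟨by simp [Array.set!], ?_⟩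
    intro j hj
    simp only [List.range'_zero, List.foldl_nil]
    interval_cases j
    · rw [pvGetD_set_ne _ _ _ _ (by omega), pvGetD_set_self _ _ _ (by simp), pvAltRec_zero]
    · rw [pvGetD_set_self _ _ _ (by simp [Array.set!]; omega), pvAltRec_one]
  | succ c ih =>
    obtain ⟨hlen, hval⟩ := ih (by omega)
    rw [List.range'_concat, show 2 + 1 * c = 2 + c from by ring, List.foldl_append]
    set a := (List.range' 2 c).foldl pvStepA (((Array.replicate (N + 1) (0 : Int)).set! 0 1).set! 1 1) with ha
    simp only [List.foldl_cons, List.foldl_nil]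
    have hi : 2 + c ≤ N := by omega
    have hk : (2 + c) / 2 < c + 2 := by omega
    have hk1 : (2 + c) / 2 - 1 < c + 2 := by omega
    have hstep : pvStepA a (2 + c) =
        a.set! (2 + c) (if (2 + c) % 2 = 0 then pvAltRec ((2 + c) / 2) + pvAltRec ((2 + c) / 2 - 1)
          else pvAltRec ((2 + c) / 2) - pvAltRec ((2 + c) / 2 - 1)) := by
      unfold pvStepA
      rw [hval _ hk, hval _ hk1]
      split_ifs <;> rfl
    rw [hstep]
    constructor
    · simp [Array.set!, hlen]
    intro j hj
    by_cases hje : j = 2 + c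
    · subst hje
      rw [pvGetD_set_self _ _ _ (by omega)]
      rw [show 2 + c = c + 2 from by ring, pvAltRec_step c, show c + 2 = 2 + c from by ring]
    · rw [pvGetD_set_ne _ _ _ _ (fun h => hje h.symm)]
      exact hval j (by omega)

-- ===== VERDICT (by name: the statement is the Claim_ definition above) =====
theorem ChampagnePapi21_spec : Claim_equal_ChampagnePapi21 := by
  intro n _ hpre
  unfold Spec_ChampagnePapi21 ChampagnePapi21 ChampagnePapi21_alt
  by_cases h0 : n = 0
  · subst h0; simp [pvAltRec_zero]
  by_cases h1 : n = 1
  · subst h1; simp [pvAltRec_one]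
  have hn2 : (2 : Int) ≤ n := by
    unfold Pre_ChampagnePapi21 at hpre; omega
  have hN : 2 ≤ n.toNat := by omega
  rw [if_neg h0, if_neg h1]
  simp only
  obtain ⟨hlen, hval⟩ := pvInv n.toNat hN (n.toNat - 1) (le_refl _)
  exact hval n.toNat (by omega)
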